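-- pv_equiv track=rewrite | github.com/buddhashrestha/videoindexer | utils.py | list_oring
-- ===== SOURCE A (Python) =====
-- def list_oring(bitmap_list):
--     or_result = bitmap_list[0]
--     i = 1
--     while True:
--         or_result = or_result | bitmap_list[i]
--         i = i + 1
--         if i == len(bitmap_list):
--             break
--     max_len = max([len(bin(i)[2:]) for i in bitmap_list])
--     # write comment for this theeesss logic////
--     offsets = list(find_offsets(or_result))[::-1]
--     offsets = [max_len - item for item in offsets]
--     return offsets
--
-- def find_offsets(haystack):
--     """
--     Find the start of all (possibly-overlapping) instances of needle in haystack
--     """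
--     offs = -1
--     while True:
--         offs = offs + 1
--         if not haystack:
--             break
--         if haystack & 1:
--             yield offs
--         haystack = haystack >> 1
-- ===== SOURCE B (Python) =====
-- def list_oring(bitmap_list):
--     # Column-wise approach: pad every bitmap's binary string to a common width
--     # and report the 1-based columns (from the left) where any string has a '1'.
--     bits = [bin(x)[2:] for x in bitmap_list]
--     width = max(len(s) for s in bits)
--     cols = [s.zfill(width) for s in bits]
--     return [j + 1 for j in range(width) if any(s[j] == "1" for s in cols)]
-- ===== Notes on version B (the rewrite author's own statement) =====
-- stated objective: alternative
-- what changed: B never ORs integers or shifts bits: it renders every bitmap as its binary string, left-pads all strings to a common width, and emits the 1-based column positions (left to right) where any string has a '1' -- a column-wise string scan instead of A's integer OR loop + bit-shifting generator + reversal + subtraction passes.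
import Mathlib
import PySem

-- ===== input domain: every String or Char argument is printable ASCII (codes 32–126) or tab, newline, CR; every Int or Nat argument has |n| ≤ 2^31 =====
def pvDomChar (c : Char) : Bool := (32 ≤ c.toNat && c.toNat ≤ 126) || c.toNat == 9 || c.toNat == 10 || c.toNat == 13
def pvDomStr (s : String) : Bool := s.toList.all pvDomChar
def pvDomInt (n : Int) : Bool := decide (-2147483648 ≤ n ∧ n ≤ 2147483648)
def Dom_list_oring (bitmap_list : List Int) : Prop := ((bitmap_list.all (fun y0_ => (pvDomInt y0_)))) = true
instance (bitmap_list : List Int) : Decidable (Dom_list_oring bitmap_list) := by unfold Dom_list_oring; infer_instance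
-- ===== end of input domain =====

-- B drops A's integer OR loop and bit-shifting generator entirely: it pads every bitmap's
-- binary string to a common width and reports the columns where any string has a '1'
-- (a column-wise string scan; alternative algorithm, no speed claim).

-- ===== PORT A =====
-- find_offsets: the generator's yields, collected in order.  Python loops forever on a
-- negative haystack (excluded by Pre_); we return [] there only to be total.
def findOffsetsGo (h : Int) (offs : Int) : List Int :=
  if h ≤ 0 then []
  else (if PySem.Int.band h 1 = 1 then [offs] else []) ++ findOffsetsGo (h >>> (1:Nat)) (offs + 1)
termination_by h.toNat
decreasing_by
  rw [Int.shiftRight_eq_div_pow h 1]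
  simp only [pow_one, Nat.cast_ofNat]
  omega

def findOffsets (haystack : Int) : List Int := findOffsetsGo haystack 0

-- the 'while True' OR loop; accesses bitmap_list[i] then breaks when i+1 == len.
-- The else branch is Python's IndexError (unreachable under Pre_).
def orLoop (l : List Int) (acc : Int) (i : Nat) : Int :=
  if h : i < l.length then
    let acc' := PySem.Int.bor acc l[i]
    if i + 1 = l.length then acc' else orLoop l acc' (i + 1)
  else acc
termination_by l.length - i

def list_oring (bitmap_list : List Int) : List Int :=
  -- bitmap_list[0]: IndexError on [] is unreachable under Pre_ (default 0 never read)
  let or_result := orLoop bitmap_list (PySem.List.pyGetD bitmap_list 0 0) 1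
  -- max([len(bin(i)[2:]) for i in bitmap_list]); max([]) raises ValueError (unreachable under Pre_)
  let max_len : Int :=
    match PySem.List.max?
        (bitmap_list.map (fun i =>
          PySem.Str.len (PySem.Str.slice (PySem.Int.pyBin i) (some 2) none))) id with
    | some m => m
    | none => 0
  let offsets := (findOffsets or_result).reverse
  offsets.map (fun item => max_len - item)

-- ===== PORT B =====
def list_oring_alt (bitmap_list : List Int) : List Int :=
  -- bits = [bin(x)[2:] for x in bitmap_list]
  let bits := bitmap_list.map (fun x => PySem.Str.slice (PySem.Int.pyBin x) (some 2) none)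
  -- width = max(len(s) for s in bits); max() on an empty list raises (unreachable under Pre_)
  let width : Int :=
    match PySem.List.max? (bits.map PySem.Str.len) id with
    | some m => m
    | none => 0
  -- cols = [s.zfill(width) for s in bits]
  let cols := bits.map (fun s => PySem.Str.zfill s width)
  -- [j + 1 for j in range(width) if any(s[j] == "1" for s in cols)]
  -- s[j] ported as PySem.Str.pyGet?; under Pre_ every col has length = width so j is in range
  ((PySem.List.pyRange 0 width 1).filter
      (fun j => cols.any (fun s => PySem.Str.pyGet? s j == some '1'))).map
    (fun j => j + 1)

-- ===== PRECONDITION & SPEC =====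
-- Pre_ excludes only inputs where A returns no value: length < 2 (IndexError in the OR loop)
-- and lists containing a negative int (find_offsets loops forever on a negative haystack).
def Pre_list_oring (bitmap_list : List Int) : Prop :=
  2 ≤ bitmap_list.length ∧ ∀ x ∈ bitmap_list, 0 ≤ x
instance (bitmap_list : List Int) : Decidable (Pre_list_oring bitmap_list) := by
  unfold Pre_list_oring; infer_instance

def pvWitness_list_oring : List Int := [5, 3]

def Spec_list_oring (bitmap_list : List Int) (out : List Int) : Prop := out = list_oring_alt bitmap_list
instance (bitmap_list : List Int) (out : List Int) : Decidable (Spec_list_oring bitmap_list out) := by unfold Spec_list_oring; infer_instance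

-- ===== CLAIM (what is proved, stated in full; the proofs are below) =====
def Claim_equal_list_oring : Prop := ∀ (bitmap_list : List Int), Dom_list_oring bitmap_list → Pre_list_oring bitmap_list → Spec_list_oring bitmap_list (list_oring bitmap_list)

-- ===== LEMMAS AND PROOFS =====

-- binary digit list of a Nat, most significant first (= what Nat.toDigits 2 produces)
def binChars (n : Nat) : List Char :=
  if n < 2 then [Nat.digitChar n]
  else binChars (n / 2) ++ [Nat.digitChar (n % 2)]

lemma toDigitsCore_eq_binChars : ∀ (f n : Nat) (acc : List Char), n < f →
    Nat.toDigitsCore 2 f n acc = binChars n ++ acc := by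
  intro f
  induction f with
  | zero => omega
  | succ f ih =>
    intro n acc hn
    rw [Nat.toDigitsCore]
    by_cases h2 : n / 2 = 0
    · have hlt : n < 2 := by omega
      rw [if_pos h2, binChars, if_pos hlt, Nat.mod_eq_of_lt hlt]
      rfl
    · have hb : binChars n = binChars (n / 2) ++ [Nat.digitChar (n % 2)] := by
        rw [binChars, if_neg (by omega)]
      rw [if_neg h2, ih (n / 2) _ (by omega), hb]
      simp

lemma bitLength_pos (m : Nat) (h : 0 < m) : 1 ≤ PySem.Int.bitLength (m : Nat) := by
  rw [PySem.Int.bitLength_natCast h]; omega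

lemma binChars_length (n : Nat) : (binChars n).length = max (PySem.Int.bitLength (n : Nat)) 1 := by
  induction n using Nat.strong_induction_on with
  | _ n ih =>
    by_cases h2 : n < 2
    · interval_cases n
      · rw [binChars]
        simp [PySem.Int.bitLength_zero]
      · rw [binChars]
        rw [show (Nat.cast 1 : Int) = ((1 : Nat) : Int) from rfl,
          PySem.Int.bitLength_natCast (by omega)]
        simp [PySem.Int.bitLength_zero]
    · rw [binChars, if_neg h2, PySem.Int.bitLength_natCast (by omega : 0 < n)]
      have ihh := ih (n / 2) (by omega)
      have hbl := bitLength_pos (n / 2) (by omega)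
      simp only [List.length_append, List.length_cons, List.length_nil, ihh]
      omega

-- bin(x)[2:] is the binary digit string of x.toNat, for nonnegative x
lemma binToList (x : Int) (hx : 0 ≤ x) :
    (PySem.Str.slice (PySem.Int.pyBin x) (some 2) none).toList = binChars x.toNat := by
  have hslice : (PySem.Str.slice (PySem.Int.pyBin x) (some 2) none).toList
      = PySem.List.slice (PySem.Int.pyBin x).toList (some 2) none := by
    simp [PySem.Str.slice]
  rw [hslice, PySem.Int.toList_pyBin]
  rw [show (2 : Int) = ((2 : Nat) : Int) from rfl, PySem.List.slice_from_natCast]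
  rw [PySem.Int.toBinChars0b, if_neg (by omega)]
  rw [List.drop_succ_cons, List.drop_succ_cons, List.drop_zero]
  have ht : Nat.toDigits 2 x.toNat = binChars x.toNat ++ [] :=
    toDigitsCore_eq_binChars (x.toNat + 1) x.toNat [] (Nat.lt_succ_self _)
  rw [ht, List.append_nil]

-- len(bin(i)[2:]) for a nonnegative int i
lemma binLen_eq (i : Int) (hi : 0 ≤ i) :
    PySem.Str.len (PySem.Str.slice (PySem.Int.pyBin i) (some 2) none)
      = ((max (PySem.Int.bitLength i) 1 : Nat) : Int) := by
  rw [PySem.Str.len_eq, binToList i hi, binChars_length, Int.toNat_of_nonneg hi]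

lemma max?_cons (x : Int) (t : List Int) :
    PySem.List.max? (x :: t) id = some (t.foldl max x) := by
  induction t generalizing x with
  | nil => rfl
  | cons y t ih =>
    have h1 : PySem.List.max? (x :: y :: t) id = PySem.List.max? (max x y :: t) id := by
      unfold PySem.List.max?
      simp only [List.foldl_cons, id_eq]
      congr 2
      by_cases h : x < y
      · rw [if_pos h, max_eq_right h.le]
      · rw [if_neg h, max_eq_left (by omega)]
    rw [h1, ih, List.foldl_cons]

lemma orLoop_eq_foldl (l : List Int) : ∀ (acc : Int) (i : Nat),
    orLoop l acc i = (l.drop i).foldl PySem.Int.bor acc := by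
  intro acc i
  induction acc, i using orLoop.induct l with
  | case1 acc i h hl =>
    rw [orLoop, dif_pos h]
    show (if i + 1 = l.length then PySem.Int.bor acc l[i]
      else orLoop l (PySem.Int.bor acc l[i]) (i + 1)) = _
    rw [if_pos hl, List.drop_eq_getElem_cons h, List.drop_eq_nil_of_le (by omega),
      List.foldl_cons, List.foldl_nil]
  | case2 acc i h acc' hl ih =>
    rw [orLoop, dif_pos h]
    show (if i + 1 = l.length then PySem.Int.bor acc l[i]
      else orLoop l (PySem.Int.bor acc l[i]) (i + 1)) = _
    rw [if_neg hl, List.drop_eq_getElem_cons h, List.foldl_cons]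
    exact ih
  | case3 acc i h =>
    rw [orLoop, dif_neg h, List.drop_eq_nil_of_le (by omega), List.foldl_nil]

-- ascending list of set-bit positions of n
def bitPos (n : Nat) : List Nat :=
  (List.range (PySem.Int.bitLength (n : Nat))).filter (fun p => n / 2 ^ p % 2 == 1)

lemma bitPos_rec (n : Nat) (h0 : n ≠ 0) :
    bitPos n = (if n % 2 = 1 then [0] else []) ++ (bitPos (n / 2)).map Nat.succ := by
  unfold bitPos
  rw [PySem.Int.bitLength_natCast (by omega : 0 < n), List.range_succ_eq_map,
    List.filter_cons, List.filter_map]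
  have hpred : ((fun p => n / 2 ^ p % 2 == 1) ∘ Nat.succ)
      = (fun p => n / 2 / 2 ^ p % 2 == 1) := by
    funext k
    simp only [Function.comp_apply]
    rw [Nat.div_div_eq_div_mul, ← pow_succ']
  rw [hpred]
  simp only [pow_zero, Nat.div_one, beq_iff_eq]
  split_ifs <;> simp

lemma findOffsetsGo_eq (n : Nat) : ∀ (offs : Int),
    findOffsetsGo (n : Nat) offs = (bitPos n).map (fun p : Nat => offs + (p : Int)) := by
  induction n using Nat.strong_induction_on with
  | _ n ih =>
    intro offs
    by_cases h0 : n = 0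
    · subst h0
      rw [findOffsetsGo, if_pos (by simp)]
      simp [bitPos, PySem.Int.bitLength_zero]
    · rw [findOffsetsGo, if_neg (by exact_mod_cast by omega : ¬ ((n : Int) ≤ 0)),
        bitPos_rec n h0]
      have hsh : ((n : Int) >>> (1 : Nat)) = ((n >>> 1 : Nat) : Int) := by simp
      have hdiv : n >>> 1 = n / 2 := by
        rw [Nat.shiftRight_eq_div_pow, pow_one]
      rw [hsh, hdiv, ih (n / 2) (by omega) (offs + 1)]
      have hband : PySem.Int.band (n : Nat) 1 = ((n % 2 : Nat) : Int) := by
        rw [show (1 : Int) = ((1 : Nat) : Int) from rfl, PySem.Int.band_natCast,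
          Nat.and_one_is_mod]
      have hmap : (bitPos (n / 2)).map (fun p : Nat => offs + 1 + (p : Int))
          = ((bitPos (n / 2)).map Nat.succ).map (fun p : Nat => offs + (p : Int)) := by
        rw [List.map_map]
        apply List.map_congr_left
        intro a _
        simp only [Function.comp_apply, Nat.succ_eq_add_one]
        push_cast
        ring
      rw [hband, hmap, List.map_append]
      by_cases hpar : n % 2 = 1
      · rw [if_pos (by exact_mod_cast congrArg (Nat.cast : Nat → Int) hpar), if_pos hpar]
        simp
      · rw [if_neg (by
          intro hc
          exact hpar (by exact_mod_cast hc)), if_neg hpar]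
        simp

lemma reverse_range (m : Nat) :
    (List.range m).reverse = (List.range m).map (fun k => m - 1 - k) := by
  apply List.ext_getElem
  · simp
  · intro i h1 h2
    simp only [List.getElem_reverse, List.getElem_map, List.getElem_range, List.length_range]

-- every character of a binary digit list is '0' or '1'
lemma binChars_mem (n : Nat) : ∀ c ∈ binChars n, c = '0' ∨ c = '1' := by
  induction n using Nat.strong_induction_on with
  | _ n ih =>
    by_cases h2 : n < 2
    · rw [binChars, if_pos h2]
      interval_cases n
      · intro c hc; simp at hc; subst hc; left; rfl
      · intro c hc; simp at hc; subst hc; right; rfl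
    · rw [binChars, if_neg h2]
      intro c hc
      rcases List.mem_append.mp hc with h | h
      · exact ih (n / 2) (by omega) c h
      · simp at h; subst h
        have := Nat.mod_lt n (show 0 < 2 by omega)
        interval_cases hm : n % 2
        · left; rfl
        · right; rfl

lemma binChars_getElem (n : Nat) : ∀ (j : Nat) (hj : j < (binChars n).length),
    (binChars n)[j] = Nat.digitChar (n / 2 ^ ((binChars n).length - 1 - j) % 2) := by
  induction n using Nat.strong_induction_on with
  | _ n ih =>
    intro j hj
    by_cases h2 : n < 2
    · have h0 : binChars n = [Nat.digitChar n] := by rw [binChars, if_pos h2]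
      have hj0 : j = 0 := by rw [h0] at hj; simpa using hj
      subst hj0
      simp [h0, Nat.mod_eq_of_lt h2]
    · have hrec : binChars n = binChars (n / 2) ++ [Nat.digitChar (n % 2)] := by
        rw [binChars, if_neg h2]
      have hlen : (binChars n).length = (binChars (n / 2)).length + 1 := by
        rw [hrec]; simp
    -- work on the appended form
      rw [List.getElem_of_eq hrec hj, hlen]
      by_cases hjl : j < (binChars (n / 2)).length
      · rw [List.getElem_append_left hjl, ih (n / 2) (by omega) j hjl]
        have he : (binChars (n / 2)).length + 1 - 1 - j
            = ((binChars (n / 2)).length - 1 - j) + 1 := by omega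
        rw [he, pow_succ', Nat.div_div_eq_div_mul]
      · have hje : j = (binChars (n / 2)).length := by
          rw [hrec] at hj; simp at hj; omega
        subst hje
        rw [List.getElem_append_right (by omega)]
        have h1 : (binChars (n / 2)).length + 1 - 1 - (binChars (n / 2)).length = 0 := by omega
        rw [h1, pow_zero, Nat.div_one]
        simp

-- cast of a Nat max-fold
lemma foldl_max_natCast (t : List Nat) : ∀ (a : Nat),
    (t.map (Nat.cast : Nat → Int)).foldl max (a : Int) = ((t.foldl max a : Nat) : Int) := by
  induction t with
  | nil => intro a; rfl
  | cons y t ih =>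
    intro a
    simp only [List.map_cons, List.foldl_cons, ← Nat.cast_max]
    exact ih (max a y)

-- A's max_len expression is the cast of the Nat-level maximum width
lemma maxlen_eq_W (l : List Int) (hne : l ≠ []) (hnn : ∀ x ∈ l, 0 ≤ x) :
    (match PySem.List.max? (l.map (fun i =>
        PySem.Str.len (PySem.Str.slice (PySem.Int.pyBin i) (some 2) none))) id with
     | some m => m | none => 0)
    = (((l.map (fun x => max (PySem.Int.bitLength x) 1)).foldl max 0 : Nat) : Int) := by
  obtain ⟨x, t, rfl⟩ := List.exists_cons_of_ne_nil hne
  have hmap : (x :: t).map (fun i =>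
      PySem.Str.len (PySem.Str.slice (PySem.Int.pyBin i) (some 2) none))
      = ((x :: t).map (fun i => max (PySem.Int.bitLength i) 1)).map (Nat.cast : Nat → Int) := by
    rw [List.map_map]
    apply List.map_congr_left
    intro a ha
    exact binLen_eq a (hnn a ha)
  rw [hmap]
  simp only [List.map_cons, max?_cons]
  rw [foldl_max_natCast, List.foldl_cons, Nat.zero_max]

-- an Int bor-fold of nonnegatives is the cast of the Nat or-fold
lemma foldl_bor_natCast (t : List Int) : ∀ (a : Int), 0 ≤ a → (∀ x ∈ t, 0 ≤ x) →
    t.foldl PySem.Int.bor a = (((t.map Int.toNat).foldl (· ||| ·) a.toNat : Nat) : Int) := by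
  induction t with
  | nil => intro a ha _; simp [Int.toNat_of_nonneg ha]
  | cons y t ih =>
    intro a ha hall
    have hy : 0 ≤ y := hall y List.mem_cons_self
    simp only [List.foldl_cons, List.map_cons]
    rw [PySem.Int.bor_of_nonneg ha hy,
      ih _ (Int.natCast_nonneg _) (fun x hx => hall x (List.mem_cons_of_mem _ hx))]
    simp

lemma foldl_or_lt (W : Nat) (t : List Nat) : ∀ (a : Nat), a < 2 ^ W → (∀ x ∈ t, x < 2 ^ W) →
    t.foldl (· ||| ·) a < 2 ^ W := by
  induction t with
  | nil => intro a ha _; exact ha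
  | cons y t ih =>
    intro a ha hall
    simp only [List.foldl_cons]
    exact ih _ (Nat.or_lt_two_pow ha (hall y List.mem_cons_self))
      (fun x hx => hall x (List.mem_cons_of_mem _ hx))

lemma testBit_foldl_or (t : List Nat) : ∀ (a k : Nat),
    (t.foldl (· ||| ·) a).testBit k = (a.testBit k || t.any (fun x => x.testBit k)) := by
  induction t with
  | nil => intro a k; simp
  | cons y t ih =>
    intro a k
    simp only [List.foldl_cons, List.any_cons, ih, Nat.testBit_or, Bool.or_assoc]

-- character j of the zero-padded binary string of x, as a bit of x
lemma col_char (x : Int) (hx : 0 ≤ x) (W k : Nat) (hk : k < W)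
    (hW : max (PySem.Int.bitLength x) 1 ≤ W) :
    (PySem.Str.pyGet? (PySem.Str.zfill (PySem.Str.slice (PySem.Int.pyBin x) (some 2) none)
        ((W : Nat) : Int)) ((k : Nat) : Int) == some '1')
      = x.toNat.testBit (W - 1 - k) := by
  rw [PySem.Str.pyGet?_natCast, PySem.Str.toList_zfill, binToList x hx]
  set m := x.toNat with hm
  have hxm : x = ((m : Nat) : Int) := (Int.toNat_of_nonneg hx).symm
  have hL : (binChars m).length = max (PySem.Int.bitLength x) 1 := by
    rw [binChars_length, ← hxm]
  set L := (binChars m).length with hLdef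
  have hLW : L ≤ W := hL ▸ hW
  have hmlt : m < 2 ^ L := by
    have h1 : m < 2 ^ PySem.Int.bitLength x := by
      have := PySem.Int.lt_two_pow_bitLength x
      have habs : x.natAbs = m := by
        have := Int.natAbs_of_nonneg hx
        omega
      omega
    calc m < 2 ^ PySem.Int.bitLength x := h1
      _ ≤ 2 ^ L := Nat.pow_le_pow_right (by omega) (by omega)
  -- zfill = left pad with '0' to width W
  have hpad : PySem.Chars.zfill (binChars m) ((W : Nat) : Int)
      = List.replicate (W - L) '0' ++ binChars m := by
    rw [PySem.Chars.zfill.eq_def]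
    by_cases hWL : ((W : Nat) : Int) ≤ ((binChars m).length : Int)
    · rw [if_pos hWL]
      have : W = L := by omega
      rw [show W - L = 0 by omega]
      simp
    · rw [if_neg hWL]
      obtain ⟨c, rest, hcs⟩ : ∃ c rest, binChars m = c :: rest := by
        cases hbc : binChars m with
        | nil => exfalso; have := binChars_length m; rw [hbc] at this; simp at this; omega
        | cons c rest => exact ⟨c, rest, rfl⟩
      rw [hcs]
      have hc01 : c = '0' ∨ c = '1' := binChars_mem m c (by rw [hcs]; simp)
      show (if c = '+' ∨ c = '-'
          then c :: (List.replicate ((((W : Nat) : Int)).toNat - (c :: rest).length) '0' ++ rest)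
          else List.replicate ((((W : Nat) : Int)).toNat - (c :: rest).length) '0' ++ c :: rest)
        = List.replicate (W - L) '0' ++ c :: rest
      rw [if_neg (by rcases hc01 with h | h <;> subst h <;> simp)]
      have h1 : (((W : Nat) : Int)).toNat = W := by simp
      rw [h1, ← hcs, hLdef]
  rw [hpad]
  have hlen : (List.replicate (W - L) '0' ++ binChars m).length = W := by
    simp [hLdef.symm]; omega
  have hkl : k < (List.replicate (W - L) '0' ++ binChars m).length := by omega
  rw [List.getElem?_eq_getElem hkl]
  by_cases hkpad : k < W - L
  · have hchar : (List.replicate (W - L) '0' ++ binChars m)[k] = '0' := by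
      rw [List.getElem_append_left (by simpa using hkpad)]
      simp
    rw [hchar]
    have hbit : m.testBit (W - 1 - k) = false := by
      apply Nat.testBit_lt_two_pow
      calc m < 2 ^ L := hmlt
        _ ≤ 2 ^ (W - 1 - k) := Nat.pow_le_pow_right (by omega) (by omega)
    rw [hbit]
    decide
  · have hidx : k - (W - L) < (binChars m).length := by omega
    have hchar : (List.replicate (W - L) '0' ++ binChars m)[k]
        = (binChars m)[k - (W - L)]'hidx := by
      rw [List.getElem_append_right (by simp; omega)]
      simp
    rw [hchar, binChars_getElem m (k - (W - L)) hidx]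
    have hexp : (binChars m).length - 1 - (k - (W - L)) = W - 1 - k := by omega
    rw [hexp, Nat.testBit_eq_decide_div_mod_eq]
    have hd2 : m / 2 ^ (W - 1 - k) % 2 < 2 := Nat.mod_lt _ (by omega)
    interval_cases hd : m / 2 ^ (W - 1 - k) % 2 <;> decide
  
-- the descending set-bit offsets, subtracted from W, are the ascending 1-columns
lemma bitset_range (n W : Nat) (hn : n < 2 ^ W) :
    (((bitPos n).map (fun p : Nat => (0 : Int) + (p : Int))).reverse).map
        (fun item => ((W : Nat) : Int) - item)
    = ((List.range W).filter (fun k => n.testBit (W - 1 - k))).map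
        (fun k => ((k : Nat) : Int) + 1) := by
  have hbl : PySem.Int.bitLength ((n : Nat) : Int) ≤ W := by
    by_cases h0 : n = 0
    · subst h0; rw [show ((0 : Nat) : Int) = 0 by rfl, PySem.Int.bitLength_zero]; omega
    · have h1 := PySem.Int.two_pow_bitLength_le ((n : Nat) : Int) (by exact_mod_cast h0)
      have h2 : ((n : Nat) : Int).natAbs = n := by simp
      rw [h2] at h1
      by_contra hc
      have : 2 ^ W ≤ 2 ^ (PySem.Int.bitLength ((n : Nat) : Int) - 1) :=
        Nat.pow_le_pow_right (by omega) (by omega)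
      omega
  set bl := PySem.Int.bitLength ((n : Nat) : Int) with hbldef
  -- extend the filter range from bl to W: high bits are 0
  have hext : (List.range W).filter (fun p => n / 2 ^ p % 2 == 1) = bitPos n := by
    unfold bitPos
    rw [← hbldef, show W = bl + (W - bl) by omega, List.range_add, List.filter_append]
    have : (List.filter (fun p => n / 2 ^ p % 2 == 1)
        ((List.range (W - bl)).map (fun k => bl + k))) = [] := by
      rw [List.filter_eq_nil_iff]
      intro p hp
      obtain ⟨k, _, rfl⟩ := List.mem_map.mp hp
      have hdiv : n / 2 ^ (bl + k) = 0 := by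
        apply Nat.div_eq_of_lt
        calc n < 2 ^ bl := by
                have := PySem.Int.lt_two_pow_bitLength ((n : Nat) : Int)
                simpa [hbldef] using this
          _ ≤ 2 ^ (bl + k) := Nat.pow_le_pow_right (by omega) (by omega)
      simp [hdiv]
    rw [this, List.append_nil]
  rw [← List.map_reverse, List.map_map, ← hext, ← List.filter_reverse, reverse_range,
    List.filter_map, List.map_map]
  have h1 : List.filter ((fun p => n / 2 ^ p % 2 == 1) ∘ fun k => W - 1 - k) (List.range W)
      = List.filter (fun k => n.testBit (W - 1 - k)) (List.range W) := by
    apply List.filter_congr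
    intro k hk
    simp only [Function.comp_apply]
    rw [Nat.testBit_eq_decide_div_mod_eq, Bool.eq_iff_iff, beq_iff_eq, decide_eq_true_iff]
  rw [h1]
  apply List.map_congr_left
  intro k hk
  have hkW : k < W := List.mem_range.mp (List.mem_filter.mp hk).1
  simp only [Function.comp_apply]
  omega

theorem list_oring_spec : Claim_equal_list_oring := by
  unfold Claim_equal_list_oring
  intro l _ hpre
  obtain ⟨hlen, hnn⟩ := hpre
  have hne : l ≠ [] := by intro h; subst h; simp at hlen
  unfold Spec_list_oring list_oring list_oring_alt findOffsets
  simp only [orLoop_eq_foldl, List.drop_one, List.map_map, Function.comp_def]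
  rw [maxlen_eq_W l hne hnn]
  set W : Nat := (l.map (fun x => max (PySem.Int.bitLength x) 1)).foldl max 0 with hWdef
  have ha0nn : (0 : Int) ≤ PySem.List.pyGetD l 0 0 := by
    rw [PySem.List.pyGetD_eq_getElem l 0 (by omega) (by exact_mod_cast by omega)]
    exact hnn _ (List.getElem_mem _)
  rw [foldl_bor_natCast l.tail _ ha0nn (fun x hx => hnn x (List.mem_of_mem_tail hx))]
  set n : Nat := (l.tail.map Int.toNat).foldl (· ||| ·) (PySem.List.pyGetD l 0 0).toNat
    with hndef
  have hmemW : ∀ x ∈ l, max (PySem.Int.bitLength x) 1 ≤ W := by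
    intro x hx
    exact (PySem.List.le_foldl_max (l.map (fun x => max (PySem.Int.bitLength x) 1)) 0).2 _
      (List.mem_map.mpr ⟨x, hx, rfl⟩)
  have hltW : ∀ x ∈ l, x.toNat < 2 ^ W := by
    intro x hx
    have h1 : x.natAbs < 2 ^ PySem.Int.bitLength x := PySem.Int.lt_two_pow_bitLength x
    have h2 : x.natAbs = x.toNat := by
      have := Int.natAbs_of_nonneg (hnn x hx)
      omega
    have h3 : PySem.Int.bitLength x ≤ W := le_trans (le_max_left _ _) (hmemW x hx)
    calc x.toNat < 2 ^ PySem.Int.bitLength x := by omega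
      _ ≤ 2 ^ W := Nat.pow_le_pow_right (by omega) h3
  -- the OR result is below 2^W
  have hnW : n < 2 ^ W := by
    rw [hndef]
    apply foldl_or_lt
    · rcases List.exists_cons_of_ne_nil hne with ⟨x0, t, rfl⟩
      rw [PySem.List.pyGetD_eq_getElem _ 0 (by omega) (by exact_mod_cast by omega)]
      exact hltW _ (List.getElem_mem _)
    · intro m hm
      obtain ⟨x, hx, rfl⟩ := List.mem_map.mp hm
      exact hltW x (List.mem_of_mem_tail hx)
  rw [findOffsetsGo_eq n 0, bitset_range n W hnW, PySem.List.pyRange_zero_natCast,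
    List.filter_map, List.map_map]
  -- the two column predicates coincide on range W
  have hfilter : ∀ k ∈ List.range W,
      ((fun j => (l.map (fun x =>
            PySem.Str.zfill (PySem.Str.slice (PySem.Int.pyBin x) (some 2) none)
              ((W : Nat) : Int))).any
          (fun s => PySem.Str.pyGet? s j == some '1')) ∘ (fun k : Nat => (k : Int))) k
        = n.testBit (W - 1 - k) := by
    intro k hk
    have hkW : k < W := List.mem_range.mp hk
    simp only [Function.comp_apply, List.any_map]
    have hany : l.any ((fun s => PySem.Str.pyGet? s ((k : Nat) : Int) == some '1') ∘
          (fun x => PySem.Str.zfill (PySem.Str.slice (PySem.Int.pyBin x) (some 2) none)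
            ((W : Nat) : Int)))
        = l.any (fun x => x.toNat.testBit (W - 1 - k)) := by
      apply PySem.List.any_congr_mem
      intro x hx
      exact col_char x (hnn x hx) W k hkW (hmemW x hx)
    rw [hany, hndef, testBit_foldl_or]
    rcases List.exists_cons_of_ne_nil hne with ⟨x0, t, rfl⟩
    rw [PySem.List.pyGetD_eq_getElem _ 0 (by omega) (by exact_mod_cast by omega)]
    simp [List.any_map, Function.comp_def]
  rw [List.filter_congr hfilter]
  simp [Function.comp_def]
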